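-- pv_equiv track=rewrite | github.com/treangenlab/Strainify | core_genome_windows_v2.py | create_overlapping_windows
-- ===== SOURCE A (Python) =====
-- def create_overlapping_windows(intervals, window_size, step_size):
--     windows = []
--     buffer = []  # To hold contiguous bases across intervals
--     current_start = None
--
--     for start, end in intervals:
--         pos = start
--         while pos <= end:
--             if current_start is None:
--                 current_start = pos
--
--             # Fill buffer with current chunk
--             chunk_size = min(end - pos + 1, window_size - len(buffer))
--             buffer.extend(range(pos, pos + chunk_size))
--             pos += chunk_size
--
--             # When we reach full window size, emit a window
--             if len(buffer) == window_size:
--                 windows.append(buffer.copy())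
--                 # Slide forward by step_size
--                 buffer = buffer[step_size:]
--                 current_start = buffer[0] if buffer else None
--
--     # Handle remaining buffer
--     if buffer:
--         windows.append(buffer.copy())
--
--     return windows
-- ===== SOURCE B (Python) =====
-- def create_overlapping_windows(intervals, window_size, step_size):
--     # Build the full contiguous stream, then slice windows out of it by index.
--     stream = []
--     for start, end in intervals:
--         stream.extend(range(start, end + 1))
--     es = min(step_size, window_size)  # A's buffer[step:] empties when step >= window
--     out = []
--     n = len(stream)
--     i = 0
--     while i + window_size <= n:
--         out.append(stream[i:i + window_size])
--         i += es
--     if i < n: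
--         out.append(stream[i:])
--     return out
-- ===== Notes on version B (the rewrite author's own statement) =====
-- stated objective: simpler
-- what changed: B first flattens all intervals into one contiguous stream, then slices windows out of it by index at an effective stride min(step_size, window_size), instead of A's per-interval position walk with a carried buffer, chunked fills and emit-on-full bookkeeping.
-- outside the precondition, e.g. on create_overlapping_windows([], 0, 0): A returns [], B does not finish within the time limit
import Mathlib
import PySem

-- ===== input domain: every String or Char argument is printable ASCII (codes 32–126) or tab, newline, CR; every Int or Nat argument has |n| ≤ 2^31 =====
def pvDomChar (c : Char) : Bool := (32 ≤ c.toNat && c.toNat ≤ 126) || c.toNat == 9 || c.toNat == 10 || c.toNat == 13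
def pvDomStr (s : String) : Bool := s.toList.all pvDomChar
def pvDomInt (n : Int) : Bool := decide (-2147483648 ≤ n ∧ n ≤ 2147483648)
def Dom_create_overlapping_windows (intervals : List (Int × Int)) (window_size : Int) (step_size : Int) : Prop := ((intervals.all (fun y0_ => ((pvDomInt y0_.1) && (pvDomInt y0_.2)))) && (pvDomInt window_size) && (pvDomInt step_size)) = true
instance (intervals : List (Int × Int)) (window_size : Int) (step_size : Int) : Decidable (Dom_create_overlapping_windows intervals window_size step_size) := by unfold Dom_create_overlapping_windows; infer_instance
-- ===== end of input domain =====

-- B flattens the intervals into one contiguous stream and chops it by slicing at stride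
-- min(step_size, window_size), replacing A's per-interval walk with a carried buffer (simpler).


-- ===== PORT A =====
-- inner 'while pos <= end' loop of A; fuel only makes the recursion total, one unit per iteration
-- (inside Pre_ each iteration advances pos by at least 1, so fuel (end - pos + 1).toNat suffices).
def pvAInner (window_size step_size endp : Int) :
    Nat → Int → List (List Int) × List Int × Option Int → List (List Int) × List Int × Option Int
  | 0, _, st => st
  | fuel+1, pos, st =>
    if pos ≤ endp then
      -- current_start tracking (dead in A: never read into the result, kept for faithfulness)
      let current_start := if st.2.2 = none then some pos else st.2.2
      let chunk_size := min (endp - pos + 1) (window_size - (st.2.1.length : Int))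
      let buffer := st.2.1 ++ PySem.List.pyRange pos (pos + chunk_size) 1
      let pos' := pos + chunk_size
      if (buffer.length : Int) = window_size then
        let windows := st.1 ++ [buffer]
        let buffer2 := PySem.List.slice buffer (some step_size) none
        pvAInner window_size step_size endp fuel pos' (windows, buffer2, buffer2.head?)
      else
        pvAInner window_size step_size endp fuel pos' (st.1, buffer, current_start)
    else st

def create_overlapping_windows (intervals : List (Int × Int)) (window_size : Int) (step_size : Int) : List (List Int) :=
  let st := intervals.foldl
    (fun st p => pvAInner window_size step_size p.2 ((p.2 - p.1 + 1).toNat) p.1 st)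
    ([], [], none)
  if st.2.1 ≠ [] then st.1 ++ [st.2.1] else st.1

-- ===== PORT B =====
-- stream.extend(range(start, end + 1)) for every interval
def pvStream (intervals : List (Int × Int)) : List Int :=
  intervals.foldl (fun s p => s ++ PySem.List.pyRange p.1 (p.2 + 1) 1) []

-- 'while i + window_size <= n: out.append(stream[i:i+window_size]); i += es' followed by
-- 'if i < n: out.append(stream[i:])'; fuel bounds the iteration count (n suffices inside Pre_).
def pvBLoop (window_size es : Int) (stream : List Int) : Nat → Int → List (List Int) → List (List Int)
  | 0, i, out =>
    if i < (stream.length : Int) then out ++ [PySem.List.slice stream (some i) none] else out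
  | fuel+1, i, out =>
    if i + window_size ≤ (stream.length : Int) then
      pvBLoop window_size es stream fuel (i + es)
        (out ++ [PySem.List.slice stream (some i) (some (i + window_size))])
    else
      if i < (stream.length : Int) then out ++ [PySem.List.slice stream (some i) none] else out

def create_overlapping_windows_alt (intervals : List (Int × Int)) (window_size : Int) (step_size : Int) : List (List Int) :=
  let stream := pvStream intervals
  let es := min step_size window_size
  pvBLoop window_size es stream stream.length 0 []

-- ===== PRECONDITION & SPEC =====
-- total number of stream positions held by the intervals
def pvTotalLen (intervals : List (Int × Int)) : Int :=
  (intervals.map (fun p => max (p.2 - p.1 + 1) 0)).sum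

-- Pre_ excludes window_size < 1, and step_size < 1 when the intervals hold at least window_size
-- positions: on those inputs A either loops forever or (negative step) slides by Python's
-- negative-slice wraparound, and B's index loop does not terminate there.
def Pre_create_overlapping_windows (intervals : List (Int × Int)) (window_size : Int) (step_size : Int) : Prop :=
  1 ≤ window_size ∧ (1 ≤ step_size ∨ pvTotalLen intervals < window_size)

instance (intervals : List (Int × Int)) (window_size : Int) (step_size : Int) : Decidable (Pre_create_overlapping_windows intervals window_size step_size) := by unfold Pre_create_overlapping_windows; infer_instance

def pvWitness_create_overlapping_windows : (List (Int × Int)) × Int × Int := ([(1, 5), (8, 9)], 3, 2)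

def Spec_create_overlapping_windows (intervals : List (Int × Int)) (window_size : Int) (step_size : Int) (out : List (List Int)) : Prop := out = create_overlapping_windows_alt intervals window_size step_size
instance (intervals : List (Int × Int)) (window_size : Int) (step_size : Int) (out : List (List Int)) : Decidable (Spec_create_overlapping_windows intervals window_size step_size out) := by unfold Spec_create_overlapping_windows; infer_instance

-- ===== CLAIM (what is proved, stated in full; the proofs are below) =====
def Claim_equal_create_overlapping_windows : Prop := ∀ (intervals : List (Int × Int)) (window_size : Int) (step_size : Int), Dom_create_overlapping_windows intervals window_size step_size → Pre_create_overlapping_windows intervals window_size step_size → Spec_create_overlapping_windows intervals window_size step_size (create_overlapping_windows intervals window_size step_size)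

-- ===== LEMMAS AND PROOFS =====

-- one element pushed through A's buffer discipline
def pvStep (ws step : Int) (st : List (List Int) × List Int) (x : Int) : List (List Int) × List Int :=
  let b := st.2 ++ [x]
  if (b.length : Int) = ws then (st.1 ++ [b], b.drop step.toNat) else (st.1, b)

-- A's trailing 'if buffer: windows.append(buffer)'
def pvFin (p : List (List Int) × List Int) : List (List Int) :=
  if p.2 ≠ [] then p.1 ++ [p.2] else p.1

-- the elementwise stream, for induction
def pvS (intervals : List (Int × Int)) : List Int :=
  intervals.flatMap (fun p => PySem.List.pyRange p.1 (p.2 + 1) 1)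

lemma pvStream_eq_pvS (intervals : List (Int × Int)) : pvStream intervals = pvS intervals := by
  unfold pvStream pvS
  rw [PySem.List.foldl_append_eq_flatMap]
  simp

lemma pv_fill_no_emit (ws step : Int) :
    ∀ (xs : List Int) (w : List (List Int)) (b : List Int),
      (b.length : Int) + xs.length < ws →
      List.foldl (pvStep ws step) (w, b) xs = (w, b ++ xs) := by
  intro xs
  induction xs with
  | nil => intro w b _; simp
  | cons x rest ih =>
    intro w b h
    have hne : ¬ (((b ++ [x]).length : Int) = ws) := by
      simp only [List.length_append, List.length_cons, List.length_nil] at *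
      push_cast at *; omega
    simp only [List.foldl_cons, pvStep, hne, if_neg, ite_false]
    rw [ih (w) (b ++ [x]) (by
      simp only [List.length_append, List.length_cons, List.length_nil] at h ⊢
      push_cast at h ⊢; omega)]
    simp

lemma pv_fill_emit (ws step : Int) :
    ∀ (xs : List Int) (w : List (List Int)) (b : List Int),
      xs ≠ [] → (b.length : Int) + xs.length = ws →
      List.foldl (pvStep ws step) (w, b) xs = (w ++ [b ++ xs], (b ++ xs).drop step.toNat) := by
  intro xs
  induction xs with
  | nil => intro _ _ h; exact absurd rfl h
  | cons x rest ih =>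
    intro w b _ h
    by_cases hr : rest = []
    · subst hr
      have hfull : (((b ++ [x]).length : Int) = ws) := by
        simp at *; push_cast at *; omega
      simp only [List.foldl_cons, pvStep, hfull, if_pos, ite_true, List.foldl_nil]
    · have hne : ¬ (((b ++ [x]).length : Int) = ws) := by
        have : 0 < rest.length := List.length_pos_of_ne_nil hr
        simp only [List.length_append, List.length_cons, List.length_nil] at *
        push_cast at *; omega
      simp only [List.foldl_cons, pvStep, hne, if_neg, ite_false]
      rw [ih w (b ++ [x]) hr (by
        have : 0 < rest.length := List.length_pos_of_ne_nil hr
        simp only [List.length_append, List.length_cons, List.length_nil] at h ⊢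
        push_cast at h ⊢; omega)]
      simp

lemma pv_inv_foldl (ws step : Int) (hw : 1 ≤ ws) (hs : 1 ≤ step) :
    ∀ (xs : List Int) (w : List (List Int)) (b : List Int),
      b.length < ws.toNat →
      ((List.foldl (pvStep ws step) (w, b) xs).2).length < ws.toNat := by
  intro xs
  induction xs with
  | nil => intro w b h; exact h
  | cons x rest ih =>
    intro w b h
    by_cases hfull : (((b ++ [x]).length : Int) = ws)
    · simp only [List.foldl_cons, pvStep, hfull, if_pos, ite_true]
      apply ih
      have hl : (b ++ [x]).length = ws.toNat := by
        have := hfull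
        simp only [List.length_append, List.length_cons, List.length_nil] at this
        omega
      simp only [List.length_drop, hl]
      omega
    · simp only [List.foldl_cons, pvStep, hfull, ite_false]
      apply ih
      simp only [List.length_append, List.length_cons, List.length_nil] at hfull ⊢
      push_cast at hfull
      omega

lemma pv_aInner_stop (ws step endp : Int) (fuel : Nat) (pos : Int)
    (st : List (List Int) × List Int × Option Int) (h : endp < pos) :
    pvAInner ws step endp fuel pos st = st := by
  cases fuel with
  | zero => rfl
  | succ f => simp only [pvAInner, if_neg (by omega : ¬ pos ≤ endp)]

lemma pv_inner_eq (ws step endp : Int) (hw : 1 ≤ ws) (hs : 1 ≤ step) :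
    ∀ (fuel : Nat) (pos : Int) (w : List (List Int)) (b : List Int) (c : Option Int),
      b.length < ws.toNat → (endp - pos + 1).toNat ≤ fuel →
      (pvAInner ws step endp fuel pos (w, b, c)).1
          = (List.foldl (pvStep ws step) (w, b) (PySem.List.pyRange pos (endp + 1) 1)).1
        ∧ (pvAInner ws step endp fuel pos (w, b, c)).2.1
          = (List.foldl (pvStep ws step) (w, b) (PySem.List.pyRange pos (endp + 1) 1)).2 := by
  intro fuel
  induction fuel with
  | zero =>
    intro pos w b c _ hf
    have : endp < pos := by omega
    rw [PySem.List.pyRange_one_eq_nil (by omega), pv_aInner_stop _ _ _ _ _ _ this]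
    exact ⟨rfl, rfl⟩
  | succ f ih =>
    intro pos w b c hb hf
    by_cases hpos : pos ≤ endp
    · have hbw : (b.length : Int) < ws := by omega
      set chunk := min (endp - pos + 1) (ws - (b.length : Int)) with hchunk
      have hc1 : 1 ≤ chunk := by omega
      have hc2 : chunk ≤ endp - pos + 1 := by omega
      have hsplit : PySem.List.pyRange pos (endp + 1) 1
          = PySem.List.pyRange pos (pos + chunk) 1 ++ PySem.List.pyRange (pos + chunk) (endp + 1) 1 :=
        PySem.List.pyRange_one_append pos (pos + chunk) (endp + 1) (by omega) (by omega)
      have hrlen : (PySem.List.pyRange pos (pos + chunk) 1).length = chunk.toNat := by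
        rw [PySem.List.length_pyRange_one]; congr 1; omega
      set buffer := b ++ PySem.List.pyRange pos (pos + chunk) 1 with hbuf
      have hbuflen : buffer.length = b.length + chunk.toNat := by
        simp [hbuf, hrlen]
      by_cases hfull : ((buffer.length : Int) = ws)
      · -- buffer reaches window_size: emit and slide
        have hrne : PySem.List.pyRange pos (pos + chunk) 1 ≠ [] := by
          apply List.ne_nil_of_length_pos; omega
        have hsum : (b.length : Int) + (PySem.List.pyRange pos (pos + chunk) 1).length = ws := by
          rw [hrlen]; omega
        have hstep1 : pvAInner ws step endp (f + 1) pos (w, b, c)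
            = pvAInner ws step endp f (pos + chunk)
                (w ++ [buffer], PySem.List.slice buffer (some step) none,
                 (PySem.List.slice buffer (some step) none).head?) := by
          simp only [pvAInner, if_pos hpos]
          rw [if_pos (by exact hfull)]
        have hslice : PySem.List.slice buffer (some step) none = buffer.drop step.toNat :=
          PySem.List.slice_from _ (by omega)
        rw [hsplit, List.foldl_append,
            pv_fill_emit ws step _ w b hrne hsum, hstep1, hslice]
        apply ih
        · simp only [List.length_drop]
          have : buffer.length = ws.toNat := by omega
          omega
        · omega
      · -- buffer stays short: this was the last chunk of the interval
        have hchv : chunk = endp - pos + 1 := by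
          rcases min_cases (endp - pos + 1) (ws - (b.length : Int)) with ⟨h1, h2⟩ | ⟨h1, h2⟩
          · omega
          · exfalso; apply hfull; rw [hbuflen]; push_cast; omega
        have hstep1 : pvAInner ws step endp (f + 1) pos (w, b, c)
            = pvAInner ws step endp f (pos + chunk)
                (w, buffer, if c = none then some pos else c) := by
          simp only [pvAInner, if_pos hpos]
          rw [if_neg (by exact hfull)]
        have hrest : PySem.List.pyRange (pos + chunk) (endp + 1) 1 = [] :=
          PySem.List.pyRange_one_eq_nil (by omega)
        rw [hsplit, List.foldl_append,
            pv_fill_no_emit ws step _ w b (by rw [hrlen]; push_cast; omega),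
            hstep1, pv_aInner_stop _ _ _ _ _ _ (by omega), hrest]
        exact ⟨rfl, rfl⟩
    · rw [PySem.List.pyRange_one_eq_nil (by omega), pv_aInner_stop _ _ _ _ _ _ (by omega)]
      exact ⟨rfl, rfl⟩

lemma pv_outer_eq (ws step : Int) (hw : 1 ≤ ws) (hs : 1 ≤ step) :
    ∀ (intervals : List (Int × Int)) (w : List (List Int)) (b : List Int) (c : Option Int),
      b.length < ws.toNat →
      (List.foldl (fun st p => pvAInner ws step p.2 ((p.2 - p.1 + 1).toNat) p.1 st) (w, b, c) intervals).1
          = (List.foldl (pvStep ws step) (w, b) (pvS intervals)).1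
        ∧ (List.foldl (fun st p => pvAInner ws step p.2 ((p.2 - p.1 + 1).toNat) p.1 st) (w, b, c) intervals).2.1
          = (List.foldl (pvStep ws step) (w, b) (pvS intervals)).2 := by
  intro intervals
  induction intervals with
  | nil => intro w b c _; exact ⟨rfl, rfl⟩
  | cons p rest ih =>
    intro w b c hb
    obtain ⟨h1, h2⟩ := pv_inner_eq ws step p.2 hw hs ((p.2 - p.1 + 1).toNat) p.1 w b c hb (by omega)
    set r := pvAInner ws step p.2 ((p.2 - p.1 + 1).toNat) p.1 (w, b, c) with hr
    set F := List.foldl (pvStep ws step) (w, b) (PySem.List.pyRange p.1 (p.2 + 1) 1) with hF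
    have hrtriple : r = (F.1, F.2, r.2.2) := by
      rcases r with ⟨r1, r2, r3⟩
      simp only at h1 h2 ⊢
      rw [h1, h2]
    have hS : pvS (p :: rest) = PySem.List.pyRange p.1 (p.2 + 1) 1 ++ pvS rest := by
      simp [pvS]
    have hinv : F.2.length < ws.toNat := pv_inv_foldl ws step hw hs _ w b hb
    simp only [List.foldl_cons]
    rw [← hr, hrtriple, hS, List.foldl_append, ← hF]
    exact ih F.1 F.2 r.2.2 hinv

-- proof-only view of B's loop: chop the (remaining) stream itself
def pvChop (ws es : Int) : Nat → List Int → List (List Int)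
  | 0, s => if s ≠ [] then [s] else []
  | f+1, s =>
    if ws ≤ (s.length : Int) then
      s.take ws.toNat :: pvChop ws es f (s.drop es.toNat)
    else if s ≠ [] then [s] else []

lemma pv_bloop_eq_chop (ws es : Int) (stream : List Int) (hes : 1 ≤ es) (hesw : es ≤ ws) :
    ∀ (fuel : Nat) (i : Int) (out : List (List Int)),
      0 ≤ i → i ≤ (stream.length : Int) →
      pvBLoop ws es stream fuel i out = out ++ pvChop ws es fuel (stream.drop i.toNat) := by
  intro fuel
  induction fuel with
  | zero =>
    intro i out h0 hn
    have hlen : ((stream.drop i.toNat).length : Int) = (stream.length : Int) - i := by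
      simp only [List.length_drop]; omega
    simp only [pvBLoop, pvChop]
    by_cases hlt : i < (stream.length : Int)
    · have hne : stream.drop i.toNat ≠ [] := by
        intro hnil
        rw [hnil] at hlen
        simp at hlen; omega
      rw [if_pos hlt, if_pos hne, PySem.List.slice_from _ h0]
    · have hnil : stream.drop i.toNat = [] := by
        apply List.eq_nil_of_length_eq_zero
        omega
      rw [if_neg hlt, if_neg (by simp [hnil])]
      simp
  | succ f ih =>
    intro i out h0 hn
    have hlen : ((stream.drop i.toNat).length : Int) = (stream.length : Int) - i := by
      simp only [List.length_drop]; omega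
    simp only [pvBLoop, pvChop]
    by_cases hc : i + ws ≤ (stream.length : Int)
    · have hc2 : ws ≤ ((stream.drop i.toNat).length : Int) := by omega
      rw [if_pos hc, if_pos hc2]
      have hslice : PySem.List.slice stream (some i) (some (i + ws))
          = (stream.drop i.toNat).take ws.toNat := by
        rw [PySem.List.slice_toNat _ h0 (by omega)]
        congr 1
        omega
      have hdd : stream.drop (i + es).toNat = (stream.drop i.toNat).drop es.toNat := by
        rw [List.drop_drop]
        congr 1
        omega
      rw [ih (i + es) _ (by omega) (by omega), hslice, hdd]
      simp
    · have hc2 : ¬ ws ≤ ((stream.drop i.toNat).length : Int) := by omega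
      rw [if_neg hc, if_neg hc2]
      by_cases hlt : i < (stream.length : Int)
      · have hne : stream.drop i.toNat ≠ [] := by
          intro hnil
          rw [hnil] at hlen
          simp at hlen; omega
        rw [if_pos hlt, if_pos hne, PySem.List.slice_from _ h0]
      · have hnil : stream.drop i.toNat = [] := by
          apply List.eq_nil_of_length_eq_zero
          omega
        rw [if_neg hlt, if_neg (by simp [hnil])]
        simp

lemma pv_chop (ws step : Int) (hw : 1 ≤ ws) (hs : 1 ≤ step) :
    ∀ (s : List Int) (w : List (List Int)) (b : List Int) (fuel : Nat),
      b.length < ws.toNat → b.length + s.length ≤ fuel →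
      pvFin (List.foldl (pvStep ws step) (w, b) s)
        = w ++ pvChop ws (min step ws) fuel (b ++ s) := by
  intro s
  induction s with
  | nil =>
    intro w b fuel hb _
    have hcond : ¬ (ws ≤ ((b ++ ([] : List Int)).length : Int)) := by simp; omega
    have hloop : pvChop ws (min step ws) fuel (b ++ []) = if b ≠ [] then [b] else [] := by
      cases fuel with
      | zero => simp only [pvChop]; split <;> simp_all
      | succ f => simp only [pvChop, if_neg hcond]; split <;> simp_all
    rw [hloop]
    simp only [List.foldl_nil, pvFin]
    split <;> simp_all
  | cons x rest ih =>
    intro w b fuel hb hf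
    by_cases hfull : (((b ++ [x]).length : Int) = ws)
    · -- window complete: the chop takes one slice
      have hb'len : (b ++ [x]).length = ws.toNat := by
        simp only [List.length_append, List.length_cons, List.length_nil] at *; omega
      obtain ⟨f, rfl⟩ : ∃ f, fuel = f + 1 := by
        cases fuel with
        | zero =>
            exfalso
            have hp : 0 < (x :: rest).length := by simp
            omega
        | succ f => exact ⟨f, rfl⟩
      set es := min step ws with hes
      have hes1 : 1 ≤ es := by omega
      have hesw : es ≤ ws := by omega
      have hdrop_eq : (b ++ [x]).drop step.toNat = (b ++ [x]).drop es.toNat := by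
        rcases le_or_gt step ws with h | h
        · have heq : es = step := by omega
          rw [heq]
        · have h1 : (b ++ [x]).drop step.toNat = [] :=
            List.drop_eq_nil_of_le (by rw [hb'len]; omega)
          have h2 : (b ++ [x]).drop es.toNat = [] :=
            List.drop_eq_nil_of_le (by rw [hb'len]; omega)
          rw [h1, h2]
      have hcond : ws ≤ (((b ++ [x]) ++ rest).length : Int) := by
        rw [List.length_append, hb'len]; push_cast; omega
      have htake : ((b ++ [x]) ++ rest).take ws.toNat = b ++ [x] := by
        rw [← hb'len, List.take_left]
      have hdrop : ((b ++ [x]) ++ rest).drop es.toNat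
          = (b ++ [x]).drop es.toNat ++ rest :=
        List.drop_append_of_le_length (by omega)
      have hstream : b ++ (x :: rest) = (b ++ [x]) ++ rest := by simp
      rw [hstream]
      have hloop : pvChop ws es (f + 1) ((b ++ [x]) ++ rest)
          = (b ++ [x]) :: pvChop ws es f ((b ++ [x]).drop es.toNat ++ rest) := by
        simp only [pvChop, if_pos hcond, htake, hdrop]
      rw [hloop]
      simp only [List.foldl_cons, pvStep, hfull, if_pos, ite_true]
      rw [hdrop_eq]
      have hdlen : ((b ++ [x]).drop es.toNat).length < ws.toNat := by
        simp only [List.length_drop]; omega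
      have hb1 : b.length + 1 = ws.toNat := by
        have h3 := hb'len
        simp only [List.length_append, List.length_cons, List.length_nil] at h3
        omega
      have hf' : b.length + rest.length + 1 ≤ f + 1 := by
        simp only [List.length_cons] at hf
        omega
      rw [ih (w ++ [b ++ [x]]) ((b ++ [x]).drop es.toNat) f hdlen
          (by simp only [List.length_drop, hb'len]; omega)]
      simp
    · -- window not yet complete: just extend the buffer
      have hb'len : (b ++ [x]).length < ws.toNat := by
        simp only [List.length_append, List.length_cons, List.length_nil] at *
        omega
      simp only [List.foldl_cons, pvStep, hfull, if_neg, ite_false]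
      rw [ih w (b ++ [x]) fuel hb'len (by simp at *; omega)]
      simp

lemma pv_spec_main (intervals : List (Int × Int)) (ws step : Int)
    (hw : 1 ≤ ws) (hs : 1 ≤ step) :
    Spec_create_overlapping_windows intervals ws step (create_overlapping_windows intervals ws step) := by
  unfold Spec_create_overlapping_windows
  unfold create_overlapping_windows create_overlapping_windows_alt
  obtain ⟨h1, h2⟩ := pv_outer_eq ws step hw hs intervals [] [] none (by simp; omega)
  set st := List.foldl (fun st p => pvAInner ws step p.2 ((p.2 - p.1 + 1).toNat) p.1 st)
      (([], [], none) : List (List Int) × List Int × Option Int) intervals with hst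
  set F := List.foldl (pvStep ws step) (([], []) : List (List Int) × List Int) (pvS intervals) with hF
  have hA : (if st.2.1 ≠ [] then st.1 ++ [st.2.1] else st.1) = pvFin F := by
    simp only [pvFin, h1, h2]
  have hB : pvBLoop ws (min step ws) (pvStream intervals) (pvStream intervals).length 0 []
      = pvChop ws (min step ws) (pvS intervals).length (pvS intervals) := by
    rw [pvStream_eq_pvS,
        pv_bloop_eq_chop ws (min step ws) (pvS intervals) (by omega) (by omega)
          (pvS intervals).length 0 [] (by omega) (by simp)]
    simp
  rw [hA, hB,
      pv_chop ws step hw hs (pvS intervals) [] [] (pvS intervals).length (by simp; omega) (by simp)]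
  simp

lemma pvTotalLen_nonneg (intervals : List (Int × Int)) : 0 ≤ pvTotalLen intervals := by
  induction intervals with
  | nil => simp [pvTotalLen]
  | cons p rest ih =>
    simp only [pvTotalLen, List.map_cons, List.sum_cons] at *
    have : 0 ≤ max (p.2 - p.1 + 1) 0 := le_max_right _ _
    omega

lemma pvS_len (intervals : List (Int × Int)) :
    ((pvS intervals).length : Int) = pvTotalLen intervals := by
  induction intervals with
  | nil => simp [pvS, pvTotalLen]
  | cons p rest ih =>
    simp only [pvS, pvTotalLen, List.flatMap_cons, List.map_cons, List.sum_cons,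
      List.length_append, PySem.List.length_pyRange_one] at *
    push_cast
    rw [ih]
    omega

lemma pv_inner_small (ws step endp : Int) :
    ∀ (fuel : Nat) (pos : Int) (w : List (List Int)) (b : List Int) (c : Option Int),
      (b.length : Int) + (endp - pos + 1) < ws → (endp - pos + 1).toNat ≤ fuel →
      (pvAInner ws step endp fuel pos (w, b, c)).1 = w
        ∧ (pvAInner ws step endp fuel pos (w, b, c)).2.1
            = b ++ PySem.List.pyRange pos (endp + 1) 1 := by
  intro fuel pos w b c h hfuel
  by_cases hpos : pos ≤ endp
  · obtain ⟨f, rfl⟩ : ∃ f, fuel = f + 1 := by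
      cases fuel with
      | zero => exfalso; omega
      | succ f => exact ⟨f, rfl⟩
    have hchunk : min (endp - pos + 1) (ws - (b.length : Int)) = endp - pos + 1 := by omega
    have hrlen : (PySem.List.pyRange pos (pos + (endp - pos + 1)) 1).length
        = (endp - pos + 1).toNat := by
      rw [PySem.List.length_pyRange_one]; congr 1; omega
    have hne : ¬ (((b ++ PySem.List.pyRange pos (pos + (endp - pos + 1)) 1).length : Int) = ws) := by
      rw [List.length_append, hrlen]; push_cast; omega
    have hr : PySem.List.pyRange pos (pos + (endp - pos + 1)) 1
        = PySem.List.pyRange pos (endp + 1) 1 := by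
      congr 1; ring
    simp only [pvAInner, if_pos hpos, hchunk, hne, ite_false]
    rw [pv_aInner_stop _ _ _ _ _ _ (by omega), hr]
    exact ⟨rfl, rfl⟩
  · rw [PySem.List.pyRange_one_eq_nil (by omega), pv_aInner_stop _ _ _ _ _ _ (by omega)]
    exact ⟨rfl, by simp⟩

lemma pv_outer_small (ws step : Int) :
    ∀ (intervals : List (Int × Int)) (w : List (List Int)) (b : List Int) (c : Option Int),
      (b.length : Int) + pvTotalLen intervals < ws →
      (List.foldl (fun st p => pvAInner ws step p.2 ((p.2 - p.1 + 1).toNat) p.1 st) (w, b, c) intervals).1 = w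
        ∧ (List.foldl (fun st p => pvAInner ws step p.2 ((p.2 - p.1 + 1).toNat) p.1 st) (w, b, c) intervals).2.1
            = b ++ pvS intervals := by
  intro intervals
  induction intervals with
  | nil => intro w b c _; exact ⟨rfl, by simp [pvS]⟩
  | cons p rest ih =>
    intro w b c h
    have hrest0 : 0 ≤ pvTotalLen rest := pvTotalLen_nonneg rest
    have hmax : p.2 - p.1 + 1 ≤ max (p.2 - p.1 + 1) 0 := le_max_left _ _
    have htot : pvTotalLen (p :: rest) = max (p.2 - p.1 + 1) 0 + pvTotalLen rest := by
      simp [pvTotalLen]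
    obtain ⟨h1, h2⟩ := pv_inner_small ws step p.2 ((p.2 - p.1 + 1).toNat) p.1 w b c
      (by omega) (by omega)
    set r := pvAInner ws step p.2 ((p.2 - p.1 + 1).toNat) p.1 (w, b, c) with hr
    have hrtriple : r = (w, b ++ PySem.List.pyRange p.1 (p.2 + 1) 1, r.2.2) := by
      rcases r with ⟨r1, r2, r3⟩
      simp only at h1 h2 ⊢
      rw [h1, h2]
    have hblen : ((b ++ PySem.List.pyRange p.1 (p.2 + 1) 1).length : Int) + pvTotalLen rest < ws := by
      rw [List.length_append, PySem.List.length_pyRange_one]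
      push_cast
      omega
    simp only [List.foldl_cons]
    rw [← hr, hrtriple]
    obtain ⟨g1, g2⟩ := ih (w) (b ++ PySem.List.pyRange p.1 (p.2 + 1) 1) r.2.2 hblen
    refine ⟨g1, ?_⟩
    rw [g2]
    simp [pvS]

-- ===== VERDICT (by name: the statement is the Claim_ definition above) =====
theorem create_overlapping_windows_spec : Claim_equal_create_overlapping_windows := by
  intro intervals ws step _ hpre
  obtain ⟨hw, hrest⟩ := hpre
  rcases hrest with hs | hsmall
  case _ => exact pv_spec_main intervals ws step hw hs
  case _ =>
    unfold Spec_create_overlapping_windows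
    unfold create_overlapping_windows create_overlapping_windows_alt
    obtain ⟨h1, h2⟩ := pv_outer_small ws step intervals [] [] none (by simpa using hsmall)
    set st := List.foldl (fun st p => pvAInner ws step p.2 ((p.2 - p.1 + 1).toNat) p.1 st)
        (([], [], none) : List (List Int) × List Int × Option Int) intervals with hst
    have hstream : pvStream intervals = pvS intervals := pvStream_eq_pvS intervals
    have hlen : ((pvS intervals).length : Int) < ws := by rw [pvS_len]; omega
    show (if st.2.1 ≠ [] then st.1 ++ [st.2.1] else st.1)
        = pvBLoop ws (min step ws) (pvStream intervals) (pvStream intervals).length 0 []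
    rw [h1, h2, hstream]
    simp only [List.nil_append]
    rcases hn : (pvS intervals).length with _ | n
    · have hnil : pvS intervals = [] := List.eq_nil_of_length_eq_zero hn
      rw [hnil]
      simp [pvBLoop]
    · have hne : pvS intervals ≠ [] := by
        intro hx; rw [hx] at hn; simp at hn
      have hcond : ¬ ((0 : Int) + ws ≤ ((pvS intervals).length : Int)) := by omega
      have hlt : (0 : Int) < ((pvS intervals).length : Int) := by rw [hn]; push_cast; omega
      simp only [pvBLoop, if_neg hcond, if_pos hlt]
      rw [PySem.List.slice_from _ (by omega)]
      simp [hne]
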